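-- pv_equiv track=rewrite | github.com/vKrains/waiter_app | engine.py | next_main_position
-- ===== SOURCE A (Python) =====
-- def next_main_position(wid, free_main, last_main_position):
--     last_pos = last_main_position.get(wid)
--
--     if last_pos is None:
--         return min(free_main)
--
--     for step in range(1, 19):
--         p = ((last_pos - 1 + step) % 18) + 1
--         if p in free_main:
--             return p
--
--     return min(free_main)
-- ===== SOURCE B (Python) =====
-- def next_main_position(wid, free_main, last_main_position):
--     last_pos = last_main_position.get(wid)
--     if last_pos is None:
--         return min(free_main)
--     cands = [p for p in free_main if 1 <= p <= 18]
--     if cands: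
--         return min(cands, key=lambda p: (p - last_pos - 1) % 18)
--     return min(free_main)
-- ===== Notes on version B (the rewrite author's own statement) =====
-- stated objective: alternative
-- what changed: replaced the 18-step sequential circular scan by an argmin over the free slots filtered to 1..18, keyed by circular forward distance (p - last_pos - 1) % 18
import Mathlib
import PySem

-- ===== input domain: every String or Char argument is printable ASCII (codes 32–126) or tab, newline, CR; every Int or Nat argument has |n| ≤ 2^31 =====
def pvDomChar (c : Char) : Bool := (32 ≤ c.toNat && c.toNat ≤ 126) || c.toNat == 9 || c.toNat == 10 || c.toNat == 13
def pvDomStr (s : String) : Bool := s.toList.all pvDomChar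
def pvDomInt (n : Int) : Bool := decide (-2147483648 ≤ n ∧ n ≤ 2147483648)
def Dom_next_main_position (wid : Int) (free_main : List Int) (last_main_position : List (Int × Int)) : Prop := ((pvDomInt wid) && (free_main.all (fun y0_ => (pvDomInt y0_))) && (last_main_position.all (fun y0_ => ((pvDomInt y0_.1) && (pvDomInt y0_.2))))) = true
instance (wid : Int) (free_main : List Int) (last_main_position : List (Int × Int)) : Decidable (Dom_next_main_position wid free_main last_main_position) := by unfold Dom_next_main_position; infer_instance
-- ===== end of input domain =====

-- B replaces A's 18-step sequential circular scan by a single argmin over the free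
-- slots in 1..18, keyed by circular forward distance from last_pos (alternative decomposition).

-- ===== PORT A =====
-- the for-loop over range(1, 19) with early return
def nmpLoopA (last_pos : Int) (free_main : List Int) : List Int → Int
  | [] => (PySem.List.min? free_main (fun x => x)).getD 0
  | step :: rest =>
      let p := PySem.Int.mod (last_pos - 1 + step) 18 + 1
      if free_main.contains p then p else nmpLoopA last_pos free_main rest

def next_main_position (wid : Int) (free_main : List Int) (last_main_position : List (Int × Int)) : Int :=
  match (PySem.Dict.ofList last_main_position).get? wid with
  | none => (PySem.List.min? free_main (fun x => x)).getD 0   -- min(free_main); Pre_ excludes []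
  | some last_pos => nmpLoopA last_pos free_main (PySem.List.pyRange 1 19 1)

-- ===== PORT B =====
def next_main_position_alt (wid : Int) (free_main : List Int) (last_main_position : List (Int × Int)) : Int :=
  match (PySem.Dict.ofList last_main_position).get? wid with
  | none => (PySem.List.min? free_main (fun x => x)).getD 0
  | some last_pos =>
      let cands := free_main.filter (fun p => decide (1 ≤ p) && decide (p ≤ 18))
      if cands ≠ [] then
        (PySem.List.min? cands (fun p => PySem.Int.mod (p - last_pos - 1) 18)).getD 0
      else (PySem.List.min? free_main (fun x => x)).getD 0

-- ===== PRECONDITION & SPEC =====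
-- Pre_ excludes exactly free_main = [], on which Python A raises ValueError (min of empty list).
def Pre_next_main_position (_wid : Int) (free_main : List Int) (_last_main_position : List (Int × Int)) : Prop := free_main ≠ []
instance (wid : Int) (free_main : List Int) (last_main_position : List (Int × Int)) : Decidable (Pre_next_main_position wid free_main last_main_position) := by unfold Pre_next_main_position; infer_instance
def pvWitness_next_main_position : Int × List Int × (List (Int × Int)) := (1, [5, 3], [(1, 4)])

def Spec_next_main_position (wid : Int) (free_main : List Int) (last_main_position : List (Int × Int)) (out : Int) : Prop := out = next_main_position_alt wid free_main last_main_position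
instance (wid : Int) (free_main : List Int) (last_main_position : List (Int × Int)) (out : Int) : Decidable (Spec_next_main_position wid free_main last_main_position out) := by unfold Spec_next_main_position; infer_instance

-- ===== CLAIM (what is proved, stated in full; the proofs are below) =====
def Claim_equal_next_main_position : Prop := ∀ (wid : Int) (free_main : List Int) (last_main_position : List (Int × Int)), Dom_next_main_position wid free_main last_main_position → Pre_next_main_position wid free_main last_main_position → Spec_next_main_position wid free_main last_main_position (next_main_position wid free_main last_main_position)

-- ===== LEMMAS AND PROOFS =====

-- the circular-distance key
lemma nmp_mod18 (a : Int) : PySem.Int.mod a 18 = a % 18 :=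
  PySem.Int.mod_eq_emod_of_pos (by norm_num)

-- if no free slot lies in 1..18 the loop falls through to min(free_main)
lemma nmpLoopA_none (L : Int) (free : List Int)
    (h : ∀ p ∈ free, ¬ (1 ≤ p ∧ p ≤ 18)) (ss : List Int) :
    nmpLoopA L free ss = (PySem.List.min? free (fun x => x)).getD 0 := by
  induction ss with
  | nil => rfl
  | cons s rest ih =>
      simp only [nmpLoopA]
      rw [if_neg, ih]
      intro hc
      have hp : (PySem.Int.mod (L - 1 + s) 18 + 1) ∈ free := by
        simpa using hc
      have := h _ hp
      rw [nmp_mod18] at this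
      omega

-- the loop over steps s0..18 returns m, the free slot in 1..18 at minimal circular distance
lemma nmpLoopA_finds (L : Int) (free : List Int) (m : Int)
    (hm : m ∈ free) (hm1 : 1 ≤ m) (hm18 : m ≤ 18)
    (hmin : ∀ p ∈ free, 1 ≤ p → p ≤ 18 → (m - L - 1) % 18 ≤ (p - L - 1) % 18) :
    ∀ s0 : Int, 1 ≤ s0 → s0 ≤ (m - L - 1) % 18 + 1 →
      nmpLoopA L free (PySem.List.pyRange s0 19 1) = m := by
  intro s0 h1 h2
  have hk0 : 0 ≤ (m - L - 1) % 18 := Int.emod_nonneg _ (by norm_num)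
  have hk17 : (m - L - 1) % 18 < 18 := Int.emod_lt_of_pos _ (by norm_num)
  have hfuel : (19 - s0).toNat ≤ 19 := by omega
  obtain ⟨n, hn⟩ : ∃ n : Nat, (19 - s0).toNat = n := ⟨_, rfl⟩
  induction n generalizing s0 with
  | zero => omega
  | succ n ih =>
      rw [PySem.List.pyRange_one_cons (by omega)]
      simp only [nmpLoopA]
      by_cases hs : s0 = (m - L - 1) % 18 + 1
      · -- this step's slot is m itself
        have hpm : PySem.Int.mod (L - 1 + s0) 18 + 1 = m := by
          rw [nmp_mod18]; omega
        rw [hpm, if_pos (by simpa using hm)]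
      · -- earlier step: its slot cannot be free (it would beat m)
        rw [if_neg, ih (s0 + 1) (by omega) (by omega) (by omega) (by omega)]
        intro hc
        set p := PySem.Int.mod (L - 1 + s0) 18 + 1 with hpdef
        have hpmem : p ∈ free := by simpa using hc
        have hp18 : 0 ≤ (L - 1 + s0) % 18 ∧ (L - 1 + s0) % 18 < 18 :=
          ⟨Int.emod_nonneg _ (by norm_num), Int.emod_lt_of_pos _ (by norm_num)⟩
        have hpr : 1 ≤ p ∧ p ≤ 18 := by rw [hpdef, nmp_mod18]; omega
        have := hmin p hpmem hpr.1 hpr.2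
        have hkp : (p - L - 1) % 18 = s0 - 1 := by rw [hpdef, nmp_mod18]; omega
        omega

-- ===== VERDICT (by name: the statement is the Claim_ definition above) =====
theorem next_main_position_spec : Claim_equal_next_main_position := by
  intro wid free lmp _ _
  unfold Spec_next_main_position next_main_position next_main_position_alt
  cases hget : (PySem.Dict.ofList lmp).get? wid with
  | none => rfl
  | some L =>
      simp only []
      by_cases hc : free.filter (fun p => decide (1 ≤ p) && decide (p ≤ 18)) = []
      · rw [if_neg (by simpa using hc)]
        apply nmpLoopA_none
        intro p hp hcond
        have : p ∈ free.filter (fun p => decide (1 ≤ p) && decide (p ≤ 18)) := by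
          simp [List.mem_filter, hp, hcond.1, hcond.2]
        rw [hc] at this; exact absurd this (by simp)
      · rw [if_pos (by simpa using hc)]
        set cands := free.filter (fun p => decide (1 ≤ p) && decide (p ≤ 18)) with hcands
        obtain ⟨m, hmeq⟩ : ∃ m, PySem.List.min? cands (fun p => PySem.Int.mod (p - L - 1) 18) = some m := by
          cases h : PySem.List.min? cands (fun p => PySem.Int.mod (p - L - 1) 18) with
          | none => exact absurd ((PySem.List.min?_eq_none_iff cands (fun p => PySem.Int.mod (p - L - 1) 18)).mp h) hc
          | some m => exact ⟨m, rfl⟩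
        rw [hmeq]
        have hmem := PySem.List.min?_mem hmeq
        have hmin := PySem.List.min?_isMin hmeq
        rw [hcands, List.mem_filter] at hmem
        have hm1 : 1 ≤ m ∧ m ≤ 18 := by
          have := hmem.2; simp at this; exact this
        refine nmpLoopA_finds L free m hmem.1 hm1.1 hm1.2 ?_ 1 (by omega) ?_
        · intro p hp hp1 hp18
          have hpc : p ∈ cands := by
            rw [hcands, List.mem_filter]; simp [hp, hp1, hp18]
          have := hmin p hpc
          simpa only [nmp_mod18] using this
        · have h0 : 0 ≤ (m - L - 1) % 18 := Int.emod_nonneg _ (by norm_num)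
          omega
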